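-- pv_equiv track=rewrite | github.com/serrasqueiro/codeclone | steerblur/mlaby/gen_dat.py | find_back
-- ===== SOURCE A (Python) =====
-- def find_back (s, anyOf):
--   assert s is not None
--   found = None
--   aLen = len( s )
--   if type( s )==str:
--     idx = aLen-1
--     while idx>=0:
--       c = s[ idx ]
--       if c in anyOf:
--         found = c
--         return found, idx
--       idx -= 1
--   return found, -1
-- ===== SOURCE B (Python) =====
-- def find_back(s, anyOf):
--     assert s is not None
--     found, idx = None, -1
--     if type(s) == str:
--         for i, c in enumerate(s):
--             if c in anyOf:
--                 found, idx = c, i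
--     return found, idx
-- ===== Notes on version B (the rewrite author's own statement) =====
-- stated objective: alternative
-- what changed: Replaces the backward while-loop with early return by a single forward enumerate scan that keeps a last-wins (found, idx) accumulator, so the rightmost match is the one left in the accumulator.
import Mathlib
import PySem

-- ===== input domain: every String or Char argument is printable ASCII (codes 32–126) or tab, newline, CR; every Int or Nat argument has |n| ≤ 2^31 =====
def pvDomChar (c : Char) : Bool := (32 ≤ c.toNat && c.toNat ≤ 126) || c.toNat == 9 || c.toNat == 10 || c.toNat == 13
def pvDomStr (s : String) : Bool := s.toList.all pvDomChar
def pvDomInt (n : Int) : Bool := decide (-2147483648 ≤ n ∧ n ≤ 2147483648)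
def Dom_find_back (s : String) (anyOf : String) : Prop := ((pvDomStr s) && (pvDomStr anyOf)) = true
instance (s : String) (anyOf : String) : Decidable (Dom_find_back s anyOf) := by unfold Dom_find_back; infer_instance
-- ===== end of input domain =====

-- B replaces A's backward scan with early return by a forward enumerate scan with a
-- last-wins accumulator; same return value, no speed claim (alternative decomposition).

-- ===== PORT A =====
-- A's while-loop, counting idx down; fuel n means idx = n - 1 (n = 0 ⇔ loop exhausted).
def find_back_loop (cs any : List Char) : Nat → Option String × Int
  | 0 => (none, -1)
  | n + 1 =>
    let c := cs.getD n ' '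
    if c ∈ any then (some (String.ofList [c]), (n : Int))
    else find_back_loop cs any n

def find_back (s : String) (anyOf : String) : Option String × Int :=
  find_back_loop s.toList anyOf.toList s.toList.length

-- ===== PORT B =====
def find_back_alt (s : String) (anyOf : String) : Option String × Int :=
  (PySem.List.enumerate s.toList 0).foldl
    (fun acc p => if p.2 ∈ anyOf.toList then (some (String.ofList [p.2]), p.1) else acc)
    (none, -1)

-- ===== PRECONDITION & SPEC =====
def Spec_find_back (s : String) (anyOf : String) (out : Option String × Int) : Prop := out = find_back_alt s anyOf
instance (s : String) (anyOf : String) (out : Option String × Int) : Decidable (Spec_find_back s anyOf out) := by unfold Spec_find_back; infer_instance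

-- ===== CLAIM (what is proved, stated in full; the proofs are below) =====
def Claim_equal_find_back : Prop := ∀ (s : String) (anyOf : String), Dom_find_back s anyOf → Spec_find_back s anyOf (find_back s anyOf)

-- ===== LEMMAS AND PROOFS =====

-- the loop with fuel ≤ xs.length never reads the appended element
theorem find_back_loop_append (xs : List Char) (x : Char) (any : List Char) :
    ∀ n, n ≤ xs.length → find_back_loop (xs ++ [x]) any n = find_back_loop xs any n := by
  intro n
  induction n with
  | zero => intro _; rfl
  | succ m ih =>
    intro h
    have hm : m < xs.length := by omega
    simp [find_back_loop, List.getD, List.getElem?_append_left hm, ih (by omega)]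

theorem find_back_key (any : List Char) (cs : List Char) :
    find_back_loop cs any cs.length =
      (PySem.List.enumerate cs 0).foldl
        (fun acc p => if p.2 ∈ any then (some (String.ofList [p.2]), p.1) else acc)
        (none, -1) := by
  induction cs using List.reverseRecOn with
  | nil => rfl
  | append_singleton xs x ih =>
    rw [PySem.List.enumerate_append]
    rw [List.foldl_append]
    simp only [PySem.List.enumerate_cons, PySem.List.enumerate_nil, List.foldl_cons,
      List.foldl_nil, List.length_append, List.length_cons, List.length_nil]
    have hget : (xs ++ [x]).getD xs.length ' ' = x := by
      simp [List.getD]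
    by_cases hx : x ∈ any
    · simp [find_back_loop, hx]
    · simp only [find_back_loop, hget, hx, ite_false]
      rw [find_back_loop_append xs x any xs.length (le_refl _), ih]

-- ===== VERDICT (by name: the statement is the Claim_ definition above) =====
theorem find_back_spec : Claim_equal_find_back := by
  intro s anyOf _
  unfold Spec_find_back find_back find_back_alt
  exact find_back_key anyOf.toList s.toList
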